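-- pv_equiv track=rewrite | github.com/Dgodman/summit | summus.py | combine_quotes
-- ===== SOURCE A (Python) =====
-- def combine_quotes(sent_list):
--     combined_sentences = []
--     i = 0
--     length = len(sent_list)
--     while i < length:
--         s1 = sent_list[i]
--         if s1.count('"') == 1:
--             j = i + 1
--             while i != j and j < length:
--                 s2 = sent_list[j]
--                 if s2.count('"') == 1:
--                     s1 += s2
--                     i = j
--                 else:
--                     j += 1
--         i += 1
--         combined_sentences.append(s1)
--     return combined_sentences
-- ===== SOURCE B (Python) =====
-- def combine_quotes(sent_list):
--     qs = [k for k, s in enumerate(sent_list) if s.count('"') == 1]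
--     out = []
--     prev = 0
--     while len(qs) >= 2:
--         a, b = qs[0], qs[1]
--         qs = qs[2:]
--         out.extend(sent_list[prev:a])
--         out.append(sent_list[a] + sent_list[b])
--         prev = b + 1
--     out.extend(sent_list[prev:])
--     return out
-- ===== Notes on version B (the rewrite author's own statement) =====
-- stated objective: simpler
-- what changed: Replaces A's nested while loops with index juggling (inner scan-and-jump with i/j) by a two-phase pass: collect the indices of sentences containing exactly one double quote once, then consume them pairwise, emitting each untouched gap as a slice and each pair as one concatenation.
import Mathlib
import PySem

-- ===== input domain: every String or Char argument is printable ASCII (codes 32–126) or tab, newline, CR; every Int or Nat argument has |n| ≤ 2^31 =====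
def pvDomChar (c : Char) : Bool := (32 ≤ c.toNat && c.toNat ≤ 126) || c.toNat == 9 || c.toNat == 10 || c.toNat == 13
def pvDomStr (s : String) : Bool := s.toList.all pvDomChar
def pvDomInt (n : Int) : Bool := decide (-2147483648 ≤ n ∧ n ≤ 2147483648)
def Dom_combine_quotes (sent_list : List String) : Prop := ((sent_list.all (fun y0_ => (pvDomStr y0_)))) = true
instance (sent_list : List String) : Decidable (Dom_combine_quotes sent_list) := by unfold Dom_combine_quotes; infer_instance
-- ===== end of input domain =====

-- B replaces A's nested scan-and-jump with a two-phase pass: collect the indices of single-quote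
-- sentences once, then emit pairwise concatenations and the untouched gaps by slicing (objective: simpler).

-- ===== PORT A =====
-- s.count('"') == 1 (the test both programs apply to a sentence)
def pvQ (s : String) : Bool := PySem.Str.count s "\"" == 1

-- inner while: 'while i != j and j < length: …'; a match sets i = j, so the loop re-check exits at once
def cqInner (l : List String) (len : Nat) (s1 : String) (i j : Nat) : String × Nat :=
  if i ≠ j ∧ j < len then
    let s2 := l.getD j ""
    if pvQ s2 then (s1 ++ s2, j)
    else cqInner l len s1 i (j + 1)
  else (s1, i)
termination_by len - j

-- i only moves forward through the inner loop (needed for the outer loop's termination)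
theorem cqInner_snd_ge (l : List String) (len : Nat) (s1 : String) (i j : Nat)
    (h : i ≤ j) : i ≤ (cqInner l len s1 i j).2 := by
  fun_induction cqInner l len s1 i j with
  | case1 j _ _ _ => simp; omega
  | case2 j _ _ _ ih => exact ih (by omega)
  | case3 j _ => simp

-- outer while: 'while i < length: …'
def cqOuter (l : List String) (len i : Nat) : List String :=
  if h : i < len then
    let s1 := l.getD i ""
    let r := if pvQ s1 then cqInner l len s1 i (i + 1) else (s1, i)
    r.1 :: cqOuter l len (r.2 + 1)
  else []
termination_by len - i
decreasing_by
  have hge : i ≤ (if h : pvQ (l.getD i "") = true then cqInner l len (l.getD i "") i (i + 1) else (l.getD i "", i)).2 := by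
    split
    · exact cqInner_snd_ge l len _ i (i + 1) (Nat.le_succ i)
    · exact Nat.le_refl i
  omega

def combine_quotes (sent_list : List String) : List String :=
  cqOuter sent_list sent_list.length 0

-- ===== PORT B =====
-- 'while len(qs) >= 2: a, b = qs[0], qs[1]; qs = qs[2:]; out += sent_list[prev:a] + [sent_list[a]+sent_list[b]]; prev = b+1'
def cqPairs (l : List String) (qs : List Int) (out : List String) (prev : Int) : List String :=
  match qs with
  | a :: b :: rest =>
      cqPairs l rest
        (out ++ PySem.List.slice l (some prev) (some a)
             ++ [PySem.List.pyGetD l a "" ++ PySem.List.pyGetD l b ""])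
        (b + 1)
  | _ => out ++ PySem.List.slice l (some prev) none

def combine_quotes_alt (sent_list : List String) : List String :=
  let qs := ((PySem.List.enumerate sent_list).filter (fun p => pvQ p.2)).map (·.1)
  cqPairs sent_list qs [] 0

-- ===== PRECONDITION & SPEC =====
def Spec_combine_quotes (sent_list : List String) (out : List String) : Prop := out = combine_quotes_alt sent_list
instance (sent_list : List String) (out : List String) : Decidable (Spec_combine_quotes sent_list out) := by unfold Spec_combine_quotes; infer_instance

-- ===== CLAIM (what is proved, stated in full; the proofs are below) =====
def Claim_equal_combine_quotes : Prop := ∀ (sent_list : List String), Dom_combine_quotes sent_list → Spec_combine_quotes sent_list (combine_quotes sent_list)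

-- ===== LEMMAS AND PROOFS =====

-- A emits the sentences of a quote-free stretch [i, m) unchanged, one per step
theorem cqOuter_skip (l : List String) (m : Nat) (hm : m ≤ l.length) :
    ∀ (n i : Nat), m - i = n → i ≤ m →
    (∀ k, i ≤ k → k < m → pvQ (l.getD k "") = false) →
    cqOuter l l.length i = (l.drop i).take (m - i) ++ cqOuter l l.length m := by
  intro n
  induction n with
  | zero =>
    intro i h0 him _
    have : i = m := by omega
    subst this
    simp
  | succ n ih =>
    intro i h0 him hno
    have hi : i < m := by omega
    have hil : i < l.length := by omega
    rw [cqOuter]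
    simp only [hil, dite_true, hno i (Nat.le_refl i) hi, Bool.false_eq_true, if_false]
    rw [ih (i + 1) (by omega) (by omega) (fun k hk1 hk2 => hno k (by omega) hk2)]
    rw [List.drop_eq_getElem_cons hil]
    have : m - i = (m - (i + 1)) + 1 := by omega
    rw [this, List.take_succ_cons]
    simp [List.getElem?_eq_getElem hil]

-- past the end the outer loop stops
theorem cqOuter_stop (l : List String) (i : Nat) (h : l.length ≤ i) :
    cqOuter l l.length i = [] := by
  rw [cqOuter]
  simp
  omega

-- a quote-free tail is emitted unchanged
theorem cqOuter_noquote (l : List String) (i : Nat) (hi : i ≤ l.length)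
    (hno : ∀ k, i ≤ k → k < l.length → pvQ (l.getD k "") = false) :
    cqOuter l l.length i = l.drop i := by
  rw [cqOuter_skip l l.length (Nat.le_refl _) (l.length - i) i rfl hi hno]
  rw [cqOuter_stop l l.length (Nat.le_refl _)]
  rw [List.append_nil]
  exact List.take_of_length_le (by simp)

-- the inner scan finds nothing: 'i' and 's1' come back unchanged
theorem cqInner_none (l : List String) (s1 : String) (i j : Nat)
    (hno : ∀ k, j ≤ k → k < l.length → pvQ (l.getD k "") = false) :
    cqInner l l.length s1 i j = (s1, i) := by
  fun_induction cqInner l l.length s1 i j with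
  | case1 j hc _ hq =>
    rw [hno j (Nat.le_refl j) hc.2] at hq
    exact absurd hq (by simp)
  | case2 j _ _ _ ih => exact ih (fun k hk1 hk2 => hno k (by omega) hk2)
  | case3 j _ => rfl

-- the inner scan finds the first quote index t ≥ j
theorem cqInner_some (l : List String) (s1 : String) (i j t : Nat)
    (hij : i < j) (hjt : j ≤ t) (ht : t < l.length) (hq : pvQ (l.getD t "") = true)
    (hno : ∀ k, j ≤ k → k < t → pvQ (l.getD k "") = false) :
    cqInner l l.length s1 i j = (s1 ++ l.getD t "", t) := by
  fun_induction cqInner l l.length s1 i j with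
  | case1 j hc _ hq =>
    have : j = t := by
      by_contra hne
      have hlt : j < t := by omega
      rw [hno j (Nat.le_refl j) hlt] at hq
      exact absurd hq (by simp)
    subst this
    rfl
  | case2 j hc s2 hnq ih =>
    have hjt2 : j ≠ t := by
      intro h
      apply hnq
      show pvQ (l.getD j "") = true
      rw [h]; exact hq
    exact ih (by omega) (by omega) (fun k hk1 hk2 => hno k (by omega) hk2)
  | case3 j hc =>
    exfalso
    exact hc ⟨by omega, by omega⟩

-- main invariant: if qs lists exactly the quote indices in [prev, len), in increasing order,
-- then B's pair loop reproduces A's outer loop from i = prev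
theorem cqPairs_eq_cqOuter (l : List String) (qs : List Nat) (out : List String) (prev : Nat)
    (hp : prev ≤ l.length)
    (hmem : ∀ k, k ∈ qs ↔ prev ≤ k ∧ k < l.length ∧ pvQ (l.getD k "") = true)
    (hsort : qs.Pairwise (· < ·)) :
    cqPairs l (qs.map (Nat.cast)) out (prev : Int) = out ++ cqOuter l l.length prev := by
  match qs with
  | [] =>
    rw [cqPairs, PySem.List.slice_from_natCast]
    rw [cqOuter_noquote l prev hp
      (fun k hk1 hk2 => by
        by_contra hq
        have := (hmem k).2 ⟨hk1, hk2, by simpa using hq⟩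
        simp at this)]
    case x_1 => intro _ _ _ h; simp at h
  | [a] =>
    have ha := (hmem a).1 (by simp)
    rw [List.map_cons, List.map_nil, cqPairs, PySem.List.slice_from_natCast]
    case x_1 => intro _ _ _ h; simp at h
    have hnoA : ∀ k, prev ≤ k → k < a → pvQ (l.getD k "") = false := by
      intro k hk1 hk2
      by_contra hq
      have hk := (hmem k).2 ⟨hk1, by omega, by simpa using hq⟩
      simp at hk
      omega
    have hnoT : ∀ k, a + 1 ≤ k → k < l.length → pvQ (l.getD k "") = false := by
      intro k hk1 hk2
      by_contra hq
      have hk := (hmem k).2 ⟨by omega, hk2, by simpa using hq⟩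
      simp at hk
      omega
    have houtA : cqOuter l l.length a = l.getD a "" :: cqOuter l l.length (a + 1) := by
      rw [cqOuter]
      simp only [ha.2.1, dite_true, ha.2.2, if_true]
      rw [cqInner_none l _ a (a + 1) hnoT]
    rw [cqOuter_skip l a (by omega) (a - prev) prev rfl (by omega) hnoA]
    rw [houtA]
    rw [cqOuter_noquote l (a + 1) (by omega) hnoT]
    have key : List.take (a - prev) (List.drop prev l) ++ l.getD a "" :: List.drop (a + 1) l
        = List.drop prev l := by
      rw [List.getD_eq_getElem l "" ha.2.1]
      conv_rhs => rw [← List.take_append_drop (a - prev) (List.drop prev l)]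
      rw [List.drop_drop]
      have hpa : prev + (a - prev) = a := by omega
      rw [hpa, List.drop_eq_getElem_cons ha.2.1]
    rw [key]
  | a :: b :: rest =>
    have ha := (hmem a).1 (by simp)
    have hb := (hmem b).1 (by simp)
    have hab : a < b := (List.pairwise_cons.1 hsort).1 b (by simp)
    have hrest : ∀ k ∈ rest, b < k := (List.pairwise_cons.1 (List.pairwise_cons.1 hsort).2).1
    have hrestA : ∀ k ∈ rest, a < k := by
      intro k hk
      exact (List.pairwise_cons.1 hsort).1 k (by simp [hk])
    have hnoA : ∀ k, prev ≤ k → k < a → pvQ (l.getD k "") = false := by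
      intro k hk1 hk2
      by_contra hq
      have hk := (hmem k).2 ⟨hk1, by omega, by simpa using hq⟩
      simp at hk
      rcases hk with h | h | h
      · omega
      · omega
      · have := hrestA k h; omega
    have hnoM : ∀ k, a + 1 ≤ k → k < b → pvQ (l.getD k "") = false := by
      intro k hk1 hk2
      by_contra hq
      have hk := (hmem k).2 ⟨by omega, by omega, by simpa using hq⟩
      simp at hk
      rcases hk with h | h | h
      · omega
      · omega
      · have := hrest k h; omega
    have houtA : cqOuter l l.length a
        = (l.getD a "" ++ l.getD b "") :: cqOuter l l.length (b + 1) := by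
      rw [cqOuter]
      simp only [ha.2.1, dite_true, ha.2.2, if_true]
      rw [cqInner_some l _ a (a + 1) b (by omega) (by omega) hb.2.1 hb.2.2 hnoM]
    rw [List.map_cons, List.map_cons, cqPairs]
    have hcast : ((b : Int) + 1) = ((b + 1 : Nat) : Int) := by push_cast; ring
    rw [hcast]
    rw [cqPairs_eq_cqOuter l rest _ (b + 1) (by omega)
      (by
        intro k
        constructor
        · intro hk
          have h1 := (hmem k).1 (by simp [hk])
          exact ⟨hrest k hk, h1.2.1, h1.2.2⟩
        · intro ⟨hk1, hk2, hk3⟩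
          have := (hmem k).2 ⟨by omega, hk2, hk3⟩
          simp at this
          rcases this with h | h | h
          · omega
          · omega
          · exact h)
      ((List.pairwise_cons.1 (List.pairwise_cons.1 hsort).2).2)]
    rw [cqOuter_skip l a (by omega) (a - prev) prev rfl (by omega) hnoA]
    rw [houtA]
    rw [PySem.List.slice_natCast, PySem.List.pyGetD_natCast, PySem.List.pyGetD_natCast]
    simp

-- the port's enumerate/filter/map index list is the Nat filter of range, cast to Int
theorem qs_port_eq (l : List String) :
    ((PySem.List.enumerate l).filter (fun p => pvQ p.2)).map (·.1)
      = ((List.range l.length).filter (fun k => pvQ (l.getD k ""))).map (Nat.cast) := by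
  rw [PySem.List.enumerate_eq_map_pyRange l ""]
  rw [List.filter_map, List.map_map]
  rw [PySem.List.pyRange_one 0 (PySem.List.len l)]
  rw [List.filter_map, List.map_map]
  simp [PySem.List.len, Function.comp_def]

-- ===== VERDICT (by name: the statement is the Claim_ definition above) =====
theorem combine_quotes_spec : Claim_equal_combine_quotes := by
  intro l _
  unfold Spec_combine_quotes combine_quotes combine_quotes_alt
  rw [qs_port_eq]
  show cqOuter l l.length 0 = cqPairs l _ [] 0
  have h := cqPairs_eq_cqOuter l ((List.range l.length).filter (fun k => pvQ (l.getD k ""))) [] 0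
      (Nat.zero_le _)
      (by intro k; simp [List.mem_filter, List.mem_range])
      (List.pairwise_lt_range.filter _)
  simpa using h.symm
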